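-- pv_equiv track=rewrite | github.com/echorniak14/BrachyD2ccEval | src/main.py | replace_css_variables
-- ===== SOURCE A (Python) =====
-- def replace_css_variables(html_content):
--     """Replaces CSS variables with their actual values for PDF generation."""
--     colors = {
--         '--text-color': '#333',
--         '--background-color': '#fff',
--         '--header-color-1': '#2a7ae2',
--         '--header-color-2': '#1e5aab',
--         '--border-color': '#ddd',
--         '--table-header-bg': '#1e5aab',
--         '--table-header-text': 'white',
--         '--table-even-row-bg': '#eaf2fa',
--         '--met-bg': '#77dd77',
--         '--met-text': 'white',
--         '--not-met-bg': '#ff6961',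
--         '--not-met-text': 'white',
--         '--warning-bg': '#fdfd96',
--         '--warning-text': 'black',
--     }
--     for var, value in colors.items():
--         html_content = html_content.replace(f'var({var})', value)
--     return html_content
-- ===== SOURCE B (Python) =====
-- import re
--
-- _COLORS = {
--     '--text-color': '#333',
--     '--background-color': '#fff',
--     '--header-color-1': '#2a7ae2',
--     '--header-color-2': '#1e5aab',
--     '--border-color': '#ddd',
--     '--table-header-bg': '#1e5aab',
--     '--table-header-text': 'white',
--     '--table-even-row-bg': '#eaf2fa',
--     '--met-bg': '#77dd77',
--     '--met-text': 'white',
--     '--not-met-bg': '#ff6961',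
--     '--not-met-text': 'white',
--     '--warning-bg': '#fdfd96',
--     '--warning-text': 'black',
-- }
--
-- _VAR_RE = re.compile(r'var\((--[a-z0-9-]+)\)')
--
--
-- def replace_css_variables(html_content):
--     """Replaces CSS variables with their actual values for PDF generation."""
--     return _VAR_RE.sub(lambda m: _COLORS.get(m.group(1), m.group(0)), html_content)
-- ===== Notes on version B (the rewrite author's own statement) =====
-- stated objective: idiomatic
-- what changed: Replaces the 14 sequential full-string str.replace passes with one compiled-regex re.sub pass whose callback looks each matched var(--name) up in the color dict and leaves unknown names unchanged.
import Mathlib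
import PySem

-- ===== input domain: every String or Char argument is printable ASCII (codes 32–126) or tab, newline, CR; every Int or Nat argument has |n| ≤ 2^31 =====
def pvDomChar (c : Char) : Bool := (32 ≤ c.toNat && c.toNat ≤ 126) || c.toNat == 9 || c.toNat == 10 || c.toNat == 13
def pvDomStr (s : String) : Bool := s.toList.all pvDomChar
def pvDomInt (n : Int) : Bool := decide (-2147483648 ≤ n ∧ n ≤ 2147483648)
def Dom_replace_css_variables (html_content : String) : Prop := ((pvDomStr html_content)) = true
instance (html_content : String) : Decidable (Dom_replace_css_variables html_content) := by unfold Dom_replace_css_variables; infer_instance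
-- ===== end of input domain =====

-- B replaces A's 14 sequential full-string replace passes with one left-to-right scan that
-- substitutes each recognized var(--name) on the fly (idiomatic single-pass re.sub in Python).

-- ===== PORT A =====
def replace_css_variables (html_content : String) : String :=
  let colors : PySem.Dict String String := PySem.Dict.ofList
    [ ("--text-color", "#333"),
      ("--background-color", "#fff"),
      ("--header-color-1", "#2a7ae2"),
      ("--header-color-2", "#1e5aab"),
      ("--border-color", "#ddd"),
      ("--table-header-bg", "#1e5aab"),
      ("--table-header-text", "white"),
      ("--table-even-row-bg", "#eaf2fa"),
      ("--met-bg", "#77dd77"),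
      ("--met-text", "white"),
      ("--not-met-bg", "#ff6961"),
      ("--not-met-text", "white"),
      ("--warning-bg", "#fdfd96"),
      ("--warning-text", "black") ]
  colors.items.foldl
    (fun acc kv => PySem.Str.replace acc ("var(" ++ kv.1 ++ ")") kv.2) html_content

-- ===== PORT B =====
-- Source B's color table, keys and values as char lists (dict[str,str] → assoc list).
def pvColors : List (List Char × List Char) :=
  [ ("--text-color".toList, "#333".toList),
    ("--background-color".toList, "#fff".toList),
    ("--header-color-1".toList, "#2a7ae2".toList),
    ("--header-color-2".toList, "#1e5aab".toList),
    ("--border-color".toList, "#ddd".toList),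
    ("--table-header-bg".toList, "#1e5aab".toList),
    ("--table-header-text".toList, "white".toList),
    ("--table-even-row-bg".toList, "#eaf2fa".toList),
    ("--met-bg".toList, "#77dd77".toList),
    ("--met-text".toList, "white".toList),
    ("--not-met-bg".toList, "#ff6961".toList),
    ("--not-met-text".toList, "white".toList),
    ("--warning-bg".toList, "#fdfd96".toList),
    ("--warning-text".toList, "black".toList) ]

-- the regex character class [a-z0-9-]
def pvIsNameChar (c : Char) : Bool := ('a' ≤ c && c ≤ 'z') || ('0' ≤ c && c ≤ '9') || c == '-'

-- one attempted match of r'var\((--[a-z0-9-]+)\)' at the head of s (hand port of the regex,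
-- exact for this pattern): returns (group 1, remainder after the match).
def pvTryMatch : List Char → Option (List Char × List Char)
  | 'v'::'a'::'r'::'('::'-'::'-'::t =>
      match t.takeWhile pvIsNameChar, t.dropWhile pvIsNameChar with
      | [], _ => none
      | r :: rs, ')'::rest => some ('-'::'-'::r::rs, rest)
      | _::_, _ => none
  | _ => none

theorem pvTryMatch_some_shape {s name rest : List Char}
    (h : pvTryMatch s = some (name, rest)) :
    (∃ run, name = '-'::'-'::run ∧ run ≠ [] ∧ run.all pvIsNameChar = true) ∧
      s = 'v'::'a'::'r'::'('::(name ++ ')'::rest) := by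
  unfold pvTryMatch at h
  split at h
  · rename_i t
    split at h
    · simp at h
    · rename_i r rs rest htake hdrop
      simp only [Option.some.injEq, Prod.mk.injEq] at h
      obtain ⟨ha, hb⟩ := h
      subst ha; subst hb
      constructor
      · refine ⟨r::rs, rfl, by simp, ?_⟩
        have hmem : ∀ x ∈ r :: rs, pvIsNameChar x = true := by
          intro x hx
          exact List.mem_takeWhile_imp (htake ▸ hx)
        simpa [List.all_eq_true] using hmem
      · have : t = (r::rs) ++ ')'::rest := by
          rw [← htake, ← hdrop, List.takeWhile_append_dropWhile]
        simp [this]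
    · simp at h
  · simp at h

theorem pvTryMatch_rest_lt {s name rest : List Char}
    (h : pvTryMatch s = some (name, rest)) : rest.length < s.length := by
  obtain ⟨-, hs⟩ := pvTryMatch_some_shape h
  subst hs; simp; omega

-- re.sub scanning loop: at each position try the pattern; on a match emit the dict value
-- (or the matched text itself when the name is unknown) and resume after the match.
def pvSub (K : List (List Char × List Char)) : List Char → List Char
  | [] => []
  | c :: cs =>
    match h : pvTryMatch (c :: cs) with
    | some (name, rest) =>
        match List.lookup name K with
        | some v => v ++ pvSub K rest
        | none => 'v'::'a'::'r'::'('::(name ++ ')' :: pvSub K rest)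
    | none => c :: pvSub K cs
termination_by s => s.length
decreasing_by
  all_goals first
    | exact pvTryMatch_rest_lt h
    | simp

def replace_css_variables_alt (html_content : String) : String :=
  String.ofList (pvSub pvColors html_content.toList)

-- ===== PRECONDITION & SPEC =====
def Spec_replace_css_variables (html_content : String) (out : String) : Prop := out = replace_css_variables_alt html_content
instance (html_content : String) (out : String) : Decidable (Spec_replace_css_variables html_content out) := by unfold Spec_replace_css_variables; infer_instance

-- ===== CLAIM (what is proved, stated in full; the proofs are below) =====
def Claim_equal_replace_css_variables : Prop := ∀ (html_content : String), Dom_replace_css_variables html_content → Spec_replace_css_variables html_content (replace_css_variables html_content)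

-- ===== LEMMAS AND PROOFS =====

-- the literal text A replaces: 'var(' ++ name ++ ')'
def pvPat (n : List Char) : List Char := 'v'::'a'::'r'::'('::(n ++ [')'])

def pvNameOK (n : List Char) : Prop :=
  ∃ run, n = '-'::'-'::run ∧ run ≠ [] ∧ run.all pvIsNameChar = true

theorem pvSub_some {K : List (List Char × List Char)} {c : Char} {cs name rest : List Char}
    (h : pvTryMatch (c::cs) = some (name, rest)) :
    pvSub K (c::cs) = match List.lookup name K with
      | some v => v ++ pvSub K rest
      | none => 'v'::'a'::'r'::'('::(name ++ ')' :: pvSub K rest) := by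
  rw [pvSub]
  split
  · rename_i name' rest' h'
    rw [h] at h'
    injection h' with h'
    injection h' with h1 h2
    subst h1; subst h2
    rfl
  · rename_i h'
    rw [h] at h'
    simp at h'

theorem pvSub_none {K : List (List Char × List Char)} {c : Char} {cs : List Char}
    (h : pvTryMatch (c::cs) = none) :
    pvSub K (c::cs) = c :: pvSub K cs := by
  rw [pvSub]
  split
  · rename_i name' rest' h'
    rw [h] at h'
    exact absurd h' (by simp)
  · rfl

theorem pvSub_nilList (K : List (List Char × List Char)) : pvSub K [] = [] := by
  rw [pvSub]

theorem pvMem_of_lookup {K : List (List Char × List Char)} {a v : List Char}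
    (h : List.lookup a K = some v) : (a, v) ∈ K := by
  induction K with
  | nil => simp [List.lookup] at h
  | cons kv K ih =>
    obtain ⟨k, w⟩ := kv
    by_cases he : a == k
    · simp only [List.lookup, he] at h
      injection h with h
      have ha : a = k := by simpa using he
      rw [ha, h]
      exact List.mem_cons_self
    · simp only [List.lookup, Bool.not_eq_true] at he
      simp only [List.lookup, he] at h
      exact List.mem_cons_of_mem _ (ih h)

-- ---- characterization of PySem.Chars.replace (nonempty pattern) ----

theorem pvGo_nil (old new : List Char) (f : Nat) (acc : List Char) :
    PySem.Chars.replace.go old new f [] acc = acc.reverse := by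
  cases f <;> rw [PySem.Chars.replace.go] <;> simp

theorem pvGo_cons (old new : List Char) (f : Nat) (c : Char) (t acc : List Char) :
    PySem.Chars.replace.go old new (f+1) (c::t) acc =
      if old.isPrefixOf (c::t) then
        PySem.Chars.replace.go old new f (List.drop old.length (c::t)) (new.reverse ++ acc)
      else PySem.Chars.replace.go old new f t (c :: acc) := by
  conv_lhs => rw [PySem.Chars.replace.go]

theorem pvGo_acc (old new : List Char) (f : Nat) (l acc : List Char) :
    PySem.Chars.replace.go old new f l acc = acc.reverse ++ PySem.Chars.replace.go old new f l [] := by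
  induction f generalizing l acc with
  | zero =>
    cases l with
    | nil => rw [pvGo_nil, pvGo_nil]; simp
    | cons c t =>
      rw [PySem.Chars.replace.go]
      conv_rhs => rw [PySem.Chars.replace.go]
      simp
  | succ f ih =>
    cases l with
    | nil => rw [pvGo_nil, pvGo_nil]; simp
    | cons c t =>
      rw [pvGo_cons, pvGo_cons]
      by_cases hp : old.isPrefixOf (c::t) = true
      · rw [if_pos hp, if_pos hp, ih _ (new.reverse ++ acc), ih _ (new.reverse ++ [])]
        simp
      · rw [if_neg hp, if_neg hp, ih _ (c :: acc), ih _ [c]]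
        simp

theorem pvGo_fuel (old new : List Char) (hold : old ≠ []) (f f' : Nat) (l : List Char)
    (h : l.length ≤ f) (h' : l.length ≤ f') :
    PySem.Chars.replace.go old new f l [] = PySem.Chars.replace.go old new f' l [] := by
  have hol : 1 ≤ old.length := by
    cases old with | nil => exact absurd rfl hold | cons _ _ => simp
  induction f generalizing f' l with
  | zero =>
    cases l with
    | nil => rw [pvGo_nil, pvGo_nil]
    | cons c t => simp at h
  | succ f ih =>
    cases l with
    | nil => rw [pvGo_nil, pvGo_nil]
    | cons c t =>
      cases f' with
      | zero => simp at h'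
      | succ f' =>
        rw [pvGo_cons, pvGo_cons]
        simp only [List.length_cons] at h h'
        by_cases hp : old.isPrefixOf (c::t) = true
        · rw [if_pos hp, if_pos hp]
          rw [pvGo_acc old new f, pvGo_acc old new f']
          have h1 : (List.drop old.length (c::t)).length ≤ f := by simp; omega
          have h2 : (List.drop old.length (c::t)).length ≤ f' := by simp; omega
          rw [ih _ _ h1 h2]
        · rw [if_neg hp, if_neg hp]
          rw [pvGo_acc old new f _ [c], pvGo_acc old new f' _ [c]]
          rw [ih f' t (by omega) (by omega)]

theorem pvRep_nil (old new : List Char) (hold : old ≠ []) :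
    PySem.Chars.replace [] old new = [] := by
  rw [PySem.Chars.replace, if_neg (by simp [List.isEmpty_iff, hold]), pvGo_nil]
  rfl

theorem pvRep_pos (old new s : List Char) (hold : old ≠ []) (h : old <+: s) :
    PySem.Chars.replace s old new = new ++ PySem.Chars.replace (s.drop old.length) old new := by
  have hol : 1 ≤ old.length := by
    cases old with | nil => exact absurd rfl hold | cons _ _ => simp
  have hs : s ≠ [] := by
    intro hs; subst hs; exact hold (List.prefix_nil.mp h)
  obtain ⟨c, t, rfl⟩ := List.exists_cons_of_ne_nil hs
  rw [PySem.Chars.replace, PySem.Chars.replace,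
    if_neg (by simp [List.isEmpty_iff, hold]), if_neg (by simp [List.isEmpty_iff, hold])]
  have hlen : (c::t).length = t.length + 1 := by simp
  rw [hlen, pvGo_cons, if_pos (List.isPrefixOf_iff_prefix.mpr h), pvGo_acc]
  simp only [List.reverse_reverse, List.append_nil]
  congr 1
  apply pvGo_fuel old new hold
  · simp; omega
  · simp

theorem pvRep_neg (old new : List Char) (c : Char) (cs : List Char) (h : ¬ old <+: (c :: cs)) :
    PySem.Chars.replace (c :: cs) old new = c :: PySem.Chars.replace cs old new := by
  have hold : old ≠ [] := by intro he; subst he; exact h (List.nil_prefix)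
  rw [PySem.Chars.replace, PySem.Chars.replace,
    if_neg (by simp [List.isEmpty_iff, hold]), if_neg (by simp [List.isEmpty_iff, hold])]
  have hlen : (c::cs).length = cs.length + 1 := by simp
  rw [hlen, pvGo_cons, if_neg (by simpa [List.isPrefixOf_iff_prefix] using h), pvGo_acc]
  simp

theorem pvRep_append (old new a t : List Char) (hold : old ≠ [])
    (H : ∀ i, i < a.length → ∀ t', ¬ old <+: (a.drop i ++ t')) :
    PySem.Chars.replace (a ++ t) old new = a ++ PySem.Chars.replace t old new := by
  induction a with
  | nil => simp
  | cons c a' ih =>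
    have h0 : ¬ old <+: (c :: (a' ++ t)) := by
      have := H 0 (by simp) t
      simpa using this
    rw [List.cons_append, pvRep_neg _ _ _ _ h0,
      ih (fun i hi t' => by simpa using H (i+1) (by simp; omega) t')]
    simp

-- ---- pattern geometry ----

theorem pvNameOK_all {n : List Char} (h : pvNameOK n) : n.all pvIsNameChar = true := by
  obtain ⟨run, rfl, -, hall⟩ := h
  simp only [List.all_cons, hall]
  decide

theorem pvPF {n name : List Char} (hn : n.all pvIsNameChar = true)
    (hm : name.all pvIsNameChar = true) {t : List Char}
    (h : (n ++ [')']) <+: ((name ++ [')']) ++ t)) : n = name := by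
  induction n generalizing name with
  | nil =>
    cases name with
    | nil => rfl
    | cons d name' =>
      simp only [List.nil_append, List.cons_append, List.cons_prefix_cons] at h
      simp [List.all_eq_true] at hm
      rw [← h.1] at hm
      exact absurd hm.1 (by decide)
  | cons c n' ih =>
    cases name with
    | nil =>
      simp only [List.cons_append, List.nil_append, List.cons_prefix_cons] at h
      simp [List.all_eq_true] at hn
      rw [h.1] at hn
      exact absurd hn.1 (by decide)
    | cons d name' =>
      simp only [List.cons_append, List.cons_prefix_cons] at h
      simp [List.all_eq_true] at hn hm
      have := ih (by simp [List.all_eq_true]; exact hn.2) (name := name')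
        (by simp [List.all_eq_true]; exact hm.2) (by simpa using h.2)
      rw [h.1, this]

-- 'var(' cannot start inside the tail  name ++ ')'  of a match
theorem pvL4 (nm : List Char) (hnm : nm.all pvIsNameChar = true) (k : Nat) (hk : k ≤ nm.length)
    (t : List Char) : ¬ (['v','a','r','('] <+: ((nm ++ [')']).drop k ++ t)) := by
  intro h
  obtain ⟨r, hr⟩ := h
  have hchar : ∀ j, j < 4 → ((nm ++ [')']).drop k ++ t)[j]? = (['v','a','r','('] : List Char)[j]? := by
    intro j hj
    rw [← hr]
    exact List.getElem?_append_left (by simpa using hj)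
  have hA : ∀ j (hj : k + j < nm.length), ((nm ++ [')']).drop k ++ t)[j]? = some (nm[k+j]'hj) := by
    intro j hj
    rw [List.getElem?_append_left (by simp; omega), List.getElem?_drop,
      List.getElem?_append_left (by omega)]
    simp [hj]
  have hB : ∀ j, k + j = nm.length → ((nm ++ [')']).drop k ++ t)[j]? = some ')' := by
    intro j hj
    rw [List.getElem?_append_left (by simp; omega), List.getElem?_drop,
      List.getElem?_append_right (by omega)]
    simp [hj]
  by_cases hd : k + 4 ≤ nm.length
  · have h1 := hA 3 (by omega)
    have h2 := hchar 3 (by omega)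
    rw [h1] at h2
    simp at h2
    have hmem : nm[k+3]'(by omega) ∈ nm := List.getElem_mem _
    rw [List.all_eq_true] at hnm
    have hch := hnm _ hmem
    rw [h2] at hch
    exact absurd hch (by decide)
  · have hj : k + (nm.length - k) = nm.length := by omega
    have h1 := hB (nm.length - k) hj
    have h2 := hchar (nm.length - k) (by omega)
    rw [h1] at h2
    have hd4 : nm.length - k < 4 := by omega
    interval_cases h : (nm.length - k) <;> simp_all

-- no occurrence of pat n starts strictly inside pat name (name ≠ n)
theorem pvNSM {n name : List Char} (hn : pvNameOK n) (hname : name.all pvIsNameChar = true)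
    (hne : n ≠ name) (i : Nat) (hi : i < (pvPat name).length) (t : List Char) :
    ¬ pvPat n <+: ((pvPat name).drop i ++ t) := by
  intro h
  match i with
  | 0 =>
    have h' : (n ++ [')']) <+: ((name ++ [')']) ++ t) := by
      simpa [pvPat, List.cons_prefix_cons] using h
    exact hne (pvPF (pvNameOK_all hn) hname h')
  | 1 => simp [pvPat, List.cons_prefix_cons] at h
  | 2 => simp [pvPat, List.cons_prefix_cons] at h
  | 3 => simp [pvPat, List.cons_prefix_cons] at h
  | (j+4) =>
    have hdrop : (pvPat name).drop (j+4) = (name ++ [')']).drop j := by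
      simp [pvPat]
    rw [hdrop] at h
    have h4 : (['v','a','r','('] : List Char) <+: ((name ++ [')']).drop j ++ t) :=
      List.IsPrefix.trans ⟨n ++ [')'], rfl⟩ h
    have hj : j ≤ name.length := by simp [pvPat] at hi; omega
    exact pvL4 name hname j hj t h4

theorem pvTM_of_prefix {n s : List Char} (hn : pvNameOK n) (h : pvPat n <+: s) :
    ∃ rest, pvTryMatch s = some (n, rest) := by
  obtain ⟨run, hrn, hne, hall⟩ := hn
  obtain ⟨r0, hr0⟩ := h
  obtain ⟨r, rs, rfl⟩ := List.exists_cons_of_ne_nil hne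
  refine ⟨r0, ?_⟩
  have hs : s = 'v'::'a'::'r'::'('::'-'::'-'::((r::rs) ++ ')'::r0) := by
    rw [← hr0, hrn]; simp [pvPat]
  subst hs
  have htake : ((r::rs) ++ ')'::r0).takeWhile pvIsNameChar = r::rs := by
    rw [List.takeWhile_append]
    have : (r::rs).takeWhile pvIsNameChar = r::rs :=
      List.takeWhile_eq_self_iff.mpr (by simpa [List.all_eq_true] using hall)
    rw [if_pos (by rw [this])]
    simp [List.takeWhile_cons, show pvIsNameChar ')' = false from by decide]
  have hdrop : ((r::rs) ++ ')'::r0).dropWhile pvIsNameChar = ')'::r0 := by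
    rw [List.dropWhile_append]
    have : (r::rs).dropWhile pvIsNameChar = [] :=
      List.dropWhile_eq_nil_iff.mpr (by simpa [List.all_eq_true] using hall)
    rw [if_pos (by rw [this]; rfl)]
    simp [List.dropWhile_cons, show pvIsNameChar ')' = false from by decide]
  rw [hrn]
  simp only [pvTryMatch]
  rw [htake, hdrop]
  rfl

-- ---- K hypotheses ----

def pvKOK (n : List Char) (K : List (List Char × List Char)) : Prop :=
  ∀ kw ∈ K, 'v' ∉ kw.2 ∧ ')' ∉ kw.2 ∧ ¬ (kw.2 <:+: pvPat n)

-- a nonempty proper suffix of pat n that begins the scan output already began the input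
theorem pvKEY {n : List Char} (hn : pvNameOK n) {K : List (List Char × List Char)}
    (hK : pvKOK n K) :
    ∀ s b, b ≠ [] → (∃ j, 1 ≤ j ∧ b = (pvPat n).drop j) → b <+: pvSub K s → b <+: s := by
  have H : ∀ N s, (s : List Char).length ≤ N →
      ∀ b, b ≠ [] → (∃ j, 1 ≤ j ∧ b = (pvPat n).drop j) → b <+: pvSub K s → b <+: s := by
    intro N
    induction N with
    | zero =>
      intro s hs b hbne _ hp
      have hnil : s = [] := List.length_eq_zero_iff.mp (by omega)
      subst hnil
      rw [pvSub_nilList] at hp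
      exact absurd (List.prefix_nil.mp hp) hbne
    | succ N ih =>
      intro s hs b hbne hj hp
      obtain ⟨j, hj1, hbj⟩ := hj
      have hjlt : j < (pvPat n).length := by
        by_contra hge
        rw [not_lt] at hge
        exact hbne (hbj.trans (List.drop_eq_nil_iff.mpr hge))
      have hbsuf : b <:+ pvPat n := hbj ▸ List.drop_suffix _ _
      have hparen : ')' ∈ b := by
        have hfront : pvPat n = ('v'::'a'::'r'::'('::n) ++ [')'] := by simp [pvPat]
        have h2 : b = (('v'::'a'::'r'::'('::n).drop j) ++ [')'] := by
          rw [hbj, hfront, List.drop_append_of_le_length (by simp [pvPat] at hjlt; simp; omega)]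
        rw [h2]
        simp
      cases s with
      | nil =>
        rw [pvSub_nilList] at hp
        exact absurd (List.prefix_nil.mp hp) hbne
      | cons c cs =>
        cases hm : pvTryMatch (c::cs) with
        | none =>
          rw [pvSub_none hm] at hp
          cases b with
          | nil => exact absurd rfl hbne
          | cons x b' =>
            rw [List.cons_prefix_cons] at hp
            obtain ⟨rfl, hp'⟩ := hp
            by_cases hb' : b' = []
            · subst hb'
              exact List.cons_prefix_cons.mpr ⟨rfl, List.nil_prefix⟩
            · have hb'j : b' = (pvPat n).drop (j+1) := by
                have : (pvPat n).drop (j+1) = List.drop 1 ((pvPat n).drop j) := by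
                  rw [List.drop_drop]
                rw [this, ← hbj, List.drop_one, List.tail_cons]
              have := ih cs (by simp at hs; omega) b' hb' ⟨j+1, by omega, hb'j⟩ hp'
              exact List.cons_prefix_cons.mpr ⟨rfl, this⟩
        | some nr =>
          obtain ⟨name, rest⟩ := nr
          have hshape := pvTryMatch_some_shape hm
          have hlt := pvTryMatch_rest_lt hm
          rw [pvSub_some hm] at hp
          cases hlk : List.lookup name K with
          | some v =>
            rw [hlk] at hp
            have hv := hK (name, v) (pvMem_of_lookup hlk)
            by_cases hlen : b.length ≤ v.length
            · have hbv : b <+: v := (List.isPrefix_append_of_length hlen).mp hp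
              exact absurd (hbv.subset hparen) hv.2.1
            · obtain ⟨rr, hrr⟩ := hp
              have hvb : v <+: b := by
                have h1 : v <+: b ++ rr := by
                  rw [hrr]
                  exact List.prefix_append _ _
                exact (List.isPrefix_append_of_length (by omega)).mp h1
              have : v <:+: pvPat n := List.IsInfix.trans hvb.isInfix hbsuf.isInfix
              exact absurd this hv.2.2
          | none =>
            rw [hlk] at hp
            have hform : ('v'::'a'::'r'::'('::(name ++ ')' :: pvSub K rest) : List Char)
                = pvPat name ++ pvSub K rest := by simp [pvPat]
            rw [hform] at hp
            by_cases hlen : b.length ≤ (pvPat name).length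
            · have hbm : b <+: pvPat name := (List.isPrefix_append_of_length hlen).mp hp
              have hs' : (c::cs : List Char) = pvPat name ++ rest := by
                rw [hshape.2]; simp [pvPat]
              rw [hs']
              exact hbm.trans (List.prefix_append _ _)
            · obtain ⟨rr, hrr⟩ := hp
              have hmb : pvPat name <+: b := by
                have h1 : pvPat name <+: b ++ rr := by
                  rw [hrr]
                  exact List.prefix_append _ _
                exact (List.isPrefix_append_of_length (by omega)).mp h1
              have h4 : (['v','a','r','('] : List Char) <+: b :=
                List.IsPrefix.trans ⟨name ++ [')'], rfl⟩ hmb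
              match j, hj1 with
              | 1, _ => simp [hbj, pvPat, List.cons_prefix_cons] at h4
              | 2, _ => simp [hbj, pvPat, List.cons_prefix_cons] at h4
              | 3, _ => simp [hbj, pvPat, List.cons_prefix_cons] at h4
              | (j'+4), _ =>
                have hdropb : b = (n ++ [')']).drop j' := by
                  rw [hbj]; simp [pvPat]
                have hj' : j' ≤ n.length := by simp [pvPat] at hjlt; omega
                exact absurd (by simpa [hdropb] using h4 :
                  (['v','a','r','('] : List Char) <+: ((n ++ [')']).drop j' ++ []))
                  (pvL4 n (pvNameOK_all hn) j' hj' [])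
  exact fun s => H s.length s le_rfl

-- one more sequential replace = one more key available to the scanner
theorem pvSTEP {n v : List Char} (hn : pvNameOK n) {K : List (List Char × List Char)}
    (hK : pvKOK n K) (s : List Char) :
    PySem.Chars.replace (pvSub K s) (pvPat n) v = pvSub (K ++ [(n, v)]) s := by
  have hpne : pvPat n ≠ [] := by simp [pvPat]
  have H : ∀ N s, (s : List Char).length ≤ N →
      PySem.Chars.replace (pvSub K s) (pvPat n) v = pvSub (K ++ [(n, v)]) s := by
    intro N
    induction N with
    | zero =>
      intro s hs
      have hnil : s = [] := List.length_eq_zero_iff.mp (by omega)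
      subst hnil
      rw [pvSub_nilList, pvSub_nilList, pvRep_nil _ _ hpne]
    | succ N ih =>
      intro s hs
      cases s with
      | nil => rw [pvSub_nilList, pvSub_nilList, pvRep_nil _ _ hpne]
      | cons c cs =>
        cases hm : pvTryMatch (c::cs) with
        | some nr =>
          obtain ⟨name, rest⟩ := nr
          have hshape := pvTryMatch_some_shape hm
          have hlt := pvTryMatch_rest_lt hm
          have hrest : rest.length ≤ N := by simp at hs hlt ⊢; omega
          have hnameall : name.all pvIsNameChar = true := by
            obtain ⟨run, hr, -, hall⟩ := hshape.1
            subst hr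
            simp only [List.all_cons, hall]
            decide
          rw [pvSub_some hm (K := K), pvSub_some hm (K := K ++ [(n,v)]), List.lookup_append]
          cases hlk : List.lookup name K with
          | some v0 =>
            simp only [Option.some_or]
            have hv0 := hK (name, v0) (pvMem_of_lookup hlk)
            rw [pvRep_append (pvPat n) v v0 (pvSub K rest) hpne ?hstr, ih rest hrest]
            case hstr =>
              intro i hi t' hpre
              have hd : (v0.drop i ++ t') = v0[i] :: (v0.drop (i+1) ++ t') := by
                rw [List.drop_eq_getElem_cons hi, List.cons_append]
              rw [hd, show pvPat n = 'v'::('a'::'r'::'('::(n++[')'])) from rfl,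
                List.cons_prefix_cons] at hpre
              exact absurd (hpre.1 ▸ List.getElem_mem hi) hv0.1
          | none =>
            simp only [Option.none_or]
            have hform : ('v'::'a'::'r'::'('::(name ++ ')' :: pvSub K rest) : List Char)
                = pvPat name ++ pvSub K rest := by simp [pvPat]
            by_cases hname : name = n
            · subst hname
              rw [show List.lookup name [(name, v)] = some v from by simp [List.lookup]]
              rw [hform, pvRep_pos _ _ _ hpne (List.prefix_append _ _), List.drop_left,
                ih rest hrest]
            · rw [show List.lookup name [(n, v)] = none from by
                  simp [List.lookup, show (name == n) = false from beq_eq_false_iff_ne.mpr hname]]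
              rw [hform, pvRep_append (pvPat n) v (pvPat name) (pvSub K rest) hpne
                (fun i hi t' => pvNSM hn hnameall (fun he => hname he.symm) i hi t'),
                ih rest hrest]
              simp [pvPat]
        | none =>
          rw [pvSub_none hm (K := K), pvSub_none hm (K := K ++ [(n,v)])]
          have hnp : ¬ pvPat n <+: (c :: pvSub K cs) := by
            intro hpre
            rw [show pvPat n = 'v'::('a'::'r'::'('::(n++[')'])) from rfl,
              List.cons_prefix_cons] at hpre
            have htail := pvKEY hn hK cs ('a'::'r'::'('::(n++[')'])) (by simp)
              ⟨1, le_rfl, rfl⟩ hpre.2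
            have hfull : pvPat n <+: (c::cs) := by
              rw [show pvPat n = 'v'::('a'::'r'::'('::(n++[')'])) from rfl,
                List.cons_prefix_cons]
              exact ⟨hpre.1, htail⟩
            obtain ⟨rest, hr⟩ := pvTM_of_prefix hn hfull
            rw [hm] at hr
            simp at hr
          rw [pvRep_neg _ _ _ _ hnp, ih cs (by simp at hs; omega)]
  exact H s.length s le_rfl

theorem pvSub_nil_key (s : List Char) : pvSub [] s = s := by
  have H : ∀ N s, (s : List Char).length ≤ N → pvSub [] s = s := by
    intro N
    induction N with
    | zero =>
      intro s hs
      have hnil : s = [] := List.length_eq_zero_iff.mp (by omega)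
      subst hnil
      exact pvSub_nilList []
    | succ N ih =>
      intro s hs
      cases s with
      | nil => exact pvSub_nilList []
      | cons c cs =>
        cases hm : pvTryMatch (c::cs) with
        | some nr =>
          obtain ⟨name, rest⟩ := nr
          have hshape := pvTryMatch_some_shape hm
          have hlt := pvTryMatch_rest_lt hm
          rw [pvSub_some hm]
          simp only [List.lookup_nil]
          rw [ih rest (by simp at hs hlt ⊢; omega), hshape.2]
        | none =>
          rw [pvSub_none hm, ih cs (by simp at hs; omega)]
  exact H s.length s le_rfl

theorem pvNameOK_of {n : List Char} (h1 : n.take 2 = ['-','-']) (h2 : 3 ≤ n.length)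
    (h3 : n.all pvIsNameChar = true) : pvNameOK n := by
  match n with
  | c1::c2::r =>
    simp at h1
    refine ⟨r, by rw [h1.1, h1.2], ?_, ?_⟩
    · intro he
      subst he
      simp at h2
    · simp [List.all_cons] at h3
      simp [List.all_eq_true]
      exact h3.2.2

theorem pvFold (L K : List (List Char × List Char))
    (HG : ∀ kv ∈ K ++ L, pvNameOK kv.1)
    (HV : ∀ kv ∈ K ++ L, ∀ kw ∈ K ++ L, 'v' ∉ kw.2 ∧ ')' ∉ kw.2 ∧ ¬ (kw.2 <:+: pvPat kv.1))
    (s : List Char) :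
    L.foldl (fun acc kv => PySem.Chars.replace acc (pvPat kv.1) kv.2) (pvSub K s)
      = pvSub (K ++ L) s := by
  induction L generalizing K with
  | nil => simp
  | cons nv L' ih =>
    obtain ⟨n, v⟩ := nv
    rw [List.foldl_cons]
    have hn : pvNameOK n := HG (n, v) (by simp)
    have hK : pvKOK n K := by
      intro kw hkw
      exact HV (n, v) (by simp) kw (by simp [hkw])
    rw [pvSTEP hn hK s]
    have := ih (K ++ [(n, v)])
      (by intro kv hkv; exact HG kv (by rw [List.append_cons]; exact hkv))
      (by intro kv hkv kw hkw
          exact HV kv (by rw [List.append_cons]; exact hkv) kw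
            (by rw [List.append_cons]; exact hkw))
    rw [this, ← List.append_cons]

theorem pvFold_str (l : List (String × String)) (init : String) :
    (l.foldl (fun acc kv => PySem.Str.replace acc ("var(" ++ kv.1 ++ ")") kv.2) init).toList
      = (l.map (fun kv => (kv.1.toList, kv.2.toList))).foldl
          (fun acc kv => PySem.Chars.replace acc (pvPat kv.1) kv.2) init.toList := by
  induction l generalizing init with
  | nil => simp
  | cons kv l' ih =>
    rw [List.foldl_cons, List.map_cons, List.foldl_cons, ih]
    congr 1
    rw [PySem.Str.toList_replace]
    congr 1
    rw [String.toList_append, String.toList_append]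
    simp [pvPat]

-- ===== VERDICT (by name: the statement is the Claim_ definition above) =====
theorem replace_css_variables_spec : Claim_equal_replace_css_variables := by
  intro h _
  unfold Spec_replace_css_variables replace_css_variables replace_css_variables_alt
  apply String.toList_inj.mp
  rw [pvFold_str]
  have hitems : (PySem.Dict.ofList
      [ (("--text-color" : String), ("#333" : String)),
        ("--background-color", "#fff"),
        ("--header-color-1", "#2a7ae2"),
        ("--header-color-2", "#1e5aab"),
        ("--border-color", "#ddd"),
        ("--table-header-bg", "#1e5aab"),
        ("--table-header-text", "white"),
        ("--table-even-row-bg", "#eaf2fa"),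
        ("--met-bg", "#77dd77"),
        ("--met-text", "white"),
        ("--not-met-bg", "#ff6961"),
        ("--not-met-text", "white"),
        ("--warning-bg", "#fdfd96"),
        ("--warning-text", "black") ]).items.map (fun kv => (kv.1.toList, kv.2.toList))
      = pvColors := by decide
  rw [hitems, String.toList_ofList]
  have HG : ∀ kv ∈ ([] : List (List Char × List Char)) ++ pvColors, pvNameOK kv.1 := by
    intro kv hkv
    fin_cases hkv <;> exact pvNameOK_of (by decide) (by decide) (by decide)
  have HV : ∀ kv ∈ ([] : List (List Char × List Char)) ++ pvColors,
      ∀ kw ∈ ([] : List (List Char × List Char)) ++ pvColors,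
      'v' ∉ kw.2 ∧ ')' ∉ kw.2 ∧ ¬ (kw.2 <:+: pvPat kv.1) := by
    simp only [List.nil_append]
    decide
  have hfold := pvFold pvColors [] HG HV h.toList
  rw [pvSub_nil_key] at hfold
  rw [List.nil_append] at hfold
  exact hfold
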